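-- pv_equiv track=rewrite | github.com/srthkdev/newsletter-ai | app/portia/writing_agent.py | _identify_low_engagement_topics
-- ===== SOURCE A (Python) =====
-- from typing import Dict, Any, List, Optional
--
-- def _identify_low_engagement_topics(
--
--     similar_newsletters: List[Dict[str, Any]],
--     topic_interests: Dict[str, int]
-- ) -> List[str]:
--     """Identify topics that historically have low engagement"""
--     if not topic_interests:
--         return []
--
--     # Sort topics by interest level (lower scores = less engaging)
--     sorted_topics = sorted(topic_interests.items(), key=lambda x: x[1])
--
--     # Return bottom 20% as topics to avoid emphasizing
--     cutoff = max(1, len(sorted_topics) // 5)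
--     return [topic for topic, _ in sorted_topics[:cutoff]]
-- ===== SOURCE B (Python) =====
-- from typing import Dict, Any, List
--
-- def _identify_low_engagement_topics(
--     similar_newsletters: List[Dict[str, Any]],
--     topic_interests: Dict[str, int]
-- ) -> List[str]:
--     """One-pass bounded selection: keep only the current bottom-`cutoff`
--     topics in a small sorted buffer instead of sorting everything."""
--     if not topic_interests:
--         return []
--     cutoff = max(1, len(topic_interests) // 5)
--     best: List[tuple] = []  # at most `cutoff` (topic, score), sorted by score, stable
--     for topic, score in topic_interests.items():
--         i = len(best)
--         for j, (_, s) in enumerate(best):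
--             if score < s:
--                 i = j
--                 break
--         if i < cutoff:
--             best.insert(i, (topic, score))
--             del best[cutoff:]
--     return [t for t, _ in best]
-- ===== Notes on version B (the rewrite author's own statement) =====
-- stated objective: alternative
-- what changed: Replaces the full stable sort followed by a 20% slice with a single pass that maintains a bounded sorted buffer of at most cutoff (topic, score) pairs via stable insertion and truncation (k-selection instead of total sorting).
import Mathlib
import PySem

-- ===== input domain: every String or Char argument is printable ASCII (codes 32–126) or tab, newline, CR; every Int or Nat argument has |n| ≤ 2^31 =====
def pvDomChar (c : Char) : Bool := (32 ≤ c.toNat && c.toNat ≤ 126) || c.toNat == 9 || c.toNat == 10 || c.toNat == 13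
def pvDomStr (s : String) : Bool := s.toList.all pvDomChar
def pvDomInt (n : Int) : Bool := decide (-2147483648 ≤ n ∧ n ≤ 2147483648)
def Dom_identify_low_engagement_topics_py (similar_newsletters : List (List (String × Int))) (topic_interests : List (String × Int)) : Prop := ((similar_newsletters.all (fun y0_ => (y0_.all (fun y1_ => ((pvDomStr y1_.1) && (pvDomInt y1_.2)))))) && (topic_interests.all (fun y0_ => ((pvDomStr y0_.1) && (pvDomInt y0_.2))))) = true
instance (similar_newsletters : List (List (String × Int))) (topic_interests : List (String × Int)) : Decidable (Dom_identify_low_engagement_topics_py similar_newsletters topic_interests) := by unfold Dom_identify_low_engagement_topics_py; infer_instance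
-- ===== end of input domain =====

-- B replaces A's full stable sort + slice by a one-pass bounded insertion buffer
-- (objective: alternative k-selection strategy, not claimed faster).

-- ===== PORT A =====
-- A: sort all items by interest (stable), take the bottom 20% (at least 1), return topics.
def identify_low_engagement_topics_py (similar_newsletters : List (List (String × Int))) (topic_interests : List (String × Int)) : List String :=
  if topic_interests = [] then []
  else
    let sorted_topics := PySem.List.sorted topic_interests (fun x => x.2)
    let cutoff : Int := max 1 (PySem.Int.floordiv (sorted_topics.length : Int) 5)
    (PySem.List.slice sorted_topics none (some cutoff)).map (fun p => p.1)

-- ===== PORT B =====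
-- B's inner loop: first position in `best` whose score is strictly greater (else len(best)).
def pvFindPos (score : Int) (best : List (String × Int)) : Nat :=
  match best with
  | [] => 0
  | p :: t => if score < p.2 then 0 else pvFindPos score t + 1

-- B: one pass; `best` holds at most `cutoff` pairs, sorted by score, stable;
-- insert at the found position and truncate (del best[cutoff:]).
def identify_low_engagement_topics_py_alt (similar_newsletters : List (List (String × Int))) (topic_interests : List (String × Int)) : List String :=
  if topic_interests = [] then []
  else
    let cutoff : Nat := (max 1 (PySem.Int.floordiv (topic_interests.length : Int) 5)).toNat
    let best := topic_interests.foldl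
      (fun best x =>
        let i := pvFindPos x.2 best
        if i < cutoff then (PySem.List.insert best (i : Int) x).take cutoff else best) []
    best.map (fun p => p.1)

-- ===== PRECONDITION & SPEC =====
def Spec_identify_low_engagement_topics_py (similar_newsletters : List (List (String × Int))) (topic_interests : List (String × Int)) (out : List String) : Prop := out = identify_low_engagement_topics_py_alt similar_newsletters topic_interests
instance (similar_newsletters : List (List (String × Int))) (topic_interests : List (String × Int)) (out : List String) : Decidable (Spec_identify_low_engagement_topics_py similar_newsletters topic_interests out) := by unfold Spec_identify_low_engagement_topics_py; infer_instance

-- ===== CLAIM (what is proved, stated in full; the proofs are below) =====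
def Claim_equal_identify_low_engagement_topics_py : Prop := ∀ (similar_newsletters : List (List (String × Int))) (topic_interests : List (String × Int)), Dom_identify_low_engagement_topics_py similar_newsletters topic_interests → Spec_identify_low_engagement_topics_py similar_newsletters topic_interests (identify_low_engagement_topics_py similar_newsletters topic_interests)

-- ===== LEMMAS AND PROOFS =====

-- insertBy at the position pvFindPos computes
theorem insertBy_eq_take_drop (x : String × Int) (b : List (String × Int)) :
    PySem.List.insertBy (fun a b => decide (a.2 < b.2)) x b
      = b.take (pvFindPos x.2 b) ++ x :: b.drop (pvFindPos x.2 b) := by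
  induction b with
  | nil => rfl
  | cons p t ih =>
      simp only [PySem.List.insertBy, pvFindPos]
      by_cases h : x.2 < p.2 <;> simp [h, ih]

theorem pvFindPos_le_length (s : Int) (b : List (String × Int)) : pvFindPos s b ≤ b.length := by
  induction b with
  | nil => simp [pvFindPos]
  | cons p t ih =>
      simp only [pvFindPos]
      split
      · simp
      · simp only [List.length_cons]; omega

-- truncating before or after a stable insertion makes no difference
theorem take_insertBy_take (x : String × Int) (c : List (String × Int)) (k : Nat) :
    ((PySem.List.insertBy (fun a b => decide (a.2 < b.2)) x (c.take k)).take k)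
      = (PySem.List.insertBy (fun a b => decide (a.2 < b.2)) x c).take k := by
  induction c generalizing k with
  | nil => simp
  | cons p t ih =>
      cases k with
      | zero => simp
      | succ m =>
          simp only [List.take_succ_cons, PySem.List.insertBy]
          by_cases h : x.2 < p.2
          · simp only [h, decide_true, if_true, List.take_succ_cons]
            cases m with
            | zero => simp
            | succ m' =>
                simp [List.take_take]
          · simp [h, ih]

-- one B-step equals full stable insertion followed by truncation (when best is within bound)
theorem step_eq_take_insertBy (k : Nat) (x : String × Int)
    (b : List (String × Int)) (hb : b.length ≤ k) :
    (let i := pvFindPos x.2 b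
     if i < k then (PySem.List.insert b (i : Int) x).take k else b)
      = (PySem.List.insertBy (fun a b => decide (a.2 < b.2)) x b).take k := by
  have hle := pvFindPos_le_length x.2 b
  rw [insertBy_eq_take_drop]
  by_cases h : pvFindPos x.2 b < k
  · simp only [h, if_true]
    rw [PySem.List.insert_natCast b (pvFindPos x.2 b) x hle]
  · simp only [h, if_false]
    have hik : pvFindPos x.2 b = k := by omega
    have hlb : b.length = k := by omega
    rw [hik, ← hlb]
    simp

-- the whole fold: B's bounded fold is the truncation of A's insertion-sort fold
theorem fold_eq (k : Nat) (l c : List (String × Int)) :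
    l.foldl (fun best x =>
        let i := pvFindPos x.2 best
        if i < k then (PySem.List.insert best (i : Int) x).take k else best) (c.take k)
      = (l.foldl (fun acc x => PySem.List.insertBy (fun a b => decide (a.2 < b.2)) x acc) c).take k := by
  induction l generalizing c with
  | nil => rfl
  | cons x t ih =>
      simp only [List.foldl_cons]
      rw [step_eq_take_insertBy k x (c.take k) (by simp), take_insertBy_take]
      exact ih (PySem.List.insertBy (fun a b => decide (a.2 < b.2)) x c)

-- ===== VERDICT (by name: the statement is the Claim_ definition above) =====
theorem identify_low_engagement_topics_py_spec : Claim_equal_identify_low_engagement_topics_py := by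
  intro sn ti _
  unfold Spec_identify_low_engagement_topics_py identify_low_engagement_topics_py identify_low_engagement_topics_py_alt
  by_cases hni : ti = []
  · simp [hni]
  · simp only [hni, if_false]
    have hlen : (PySem.List.sorted ti (fun x => x.2)).length = ti.length :=
      PySem.List.length_sorted ti _ _
    set cI : Int := max 1 (PySem.Int.floordiv (ti.length : Int) 5) with hcI
    have hc0 : 0 ≤ cI := by
      have : (1:Int) ≤ cI := le_max_left _ _
      omega
    rw [hlen, PySem.List.slice_to _ hc0]
    rw [PySem.List.sorted_eq_foldl_insertBy ti (fun x => x.2)]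
    rw [← fold_eq cI.toNat ti []]
    simp
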